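-- pv_equiv track=rewrite | github.com/smohapatra1/scripting | python/practice/start_again/2024/05122024/similar_strings.py | extract_map2
-- ===== SOURCE A (Python) =====
-- def extract_map2(subst):
--     pairs_ = []
--     len_ = len(subst)
--     follow_map = 0
--     for s in range(len_-1):
--         if follow_map & 1 == 0:
--             follow_map >>= 1
--             s_pairs_ = 0b0
--             index = 0
--             for e in range(s + 1, len_):
--                 if subst[s] == subst[e]:
--                     s_pairs_ += 1 << index
--                 index += 1
--             follow_map |= s_pairs_
--             pairs_.append([s, s_pairs_])
--         else:
--             follow_map >>= 1
--     return pairs_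
-- ===== SOURCE B (Python) =====
-- def extract_map2(subst):
--     n = len(subst)
--     return [[s, sum(1 << (e - s - 1) for e in range(s + 1, n) if subst[e] == subst[s])]
--             for s in range(n - 1) if subst[s] not in subst[:s]]
-- ===== Notes on version B (the rewrite author's own statement) =====
-- stated objective: simpler
-- what changed: B drops A's incrementally shifted follow_map bitmask state machine and instead emits a pair for each index s < len-1 whose character does not occur in subst[:s], computing the mask as a comprehension sum over the later equal positions.
import Mathlib
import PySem

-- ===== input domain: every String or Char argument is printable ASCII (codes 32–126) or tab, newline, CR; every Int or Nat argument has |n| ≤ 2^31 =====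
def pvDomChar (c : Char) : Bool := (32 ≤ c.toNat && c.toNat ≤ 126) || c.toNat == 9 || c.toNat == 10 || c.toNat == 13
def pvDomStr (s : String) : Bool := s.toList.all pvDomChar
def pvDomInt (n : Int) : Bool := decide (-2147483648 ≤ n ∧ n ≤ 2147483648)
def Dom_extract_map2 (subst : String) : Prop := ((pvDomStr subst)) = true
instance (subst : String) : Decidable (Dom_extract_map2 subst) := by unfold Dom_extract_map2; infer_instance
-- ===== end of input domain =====

-- B replaces A's incrementally shifted `follow_map` bitmask state machine by a stateless
-- comprehension: emit a pair for s exactly when subst[s] does not occur in subst[:s] (simpler).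

-- ===== PORT A =====
-- The loop body of A, as a named helper (follow_map and the bit arithmetic stay in Nat:
-- in Python both stay nonnegative ints, so Nat's &&&/>>>/<<</||| are exact here).
def extract_map2_step (cs : List Char) (len_ : Nat) (st : List (List Int) × Nat) (s : Nat) :
    List (List Int) × Nat :=
  if st.2 &&& 1 == 0 then
    let follow_map := st.2 >>> 1
    -- inner loop: for e in range(s+1, len_), with the running `index` counter
    let inner := (List.range' (s + 1) (len_ - (s + 1))).foldl
      (fun (u : Nat × Nat) (e : Nat) =>
        ((if PySem.List.pyGetD cs (s : Int) ' ' == PySem.List.pyGetD cs (e : Int) ' '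
          then u.1 + (1 <<< u.2) else u.1), u.2 + 1))
      (0, 0)
    let s_pairs_ := inner.1
    (st.1 ++ [[(s : Int), (s_pairs_ : Int)]], follow_map ||| s_pairs_)
  else (st.1, st.2 >>> 1)

-- range(len_-1) / range(s+1, len_) have nonnegative bounds, so List.range/range' are exact.
def extract_map2 (subst : String) : List (List Int) :=
  let cs := subst.toList
  let len_ := cs.length
  ((List.range (len_ - 1)).foldl (extract_map2_step cs len_) ([], 0)).1

-- ===== PORT B =====
-- `subst[s] not in subst[:s]` tests membership of a 1-character string, i.e. char membership.
def extract_map2_alt (subst : String) : List (List Int) :=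
  let cs := subst.toList
  let n := cs.length
  ((List.range (n - 1)).filter
      (fun (s : Nat) => !((PySem.List.slice cs none (some (s : Int))).contains
                    (PySem.List.pyGetD cs (s : Int) ' ')))).map
    (fun (s : Nat) => [(s : Int),
      (((List.range' (s + 1) (n - (s + 1))).filter
          (fun (e : Nat) => PySem.List.pyGetD cs (e : Int) ' ' == PySem.List.pyGetD cs (s : Int) ' ')).map
        (fun (e : Nat) => ((1 <<< (e - s - 1) : Nat) : Int))).sum])

-- ===== PRECONDITION & SPEC =====
def Spec_extract_map2 (subst : String) (out : List (List Int)) : Prop := out = extract_map2_alt subst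
instance (subst : String) (out : List (List Int)) : Decidable (Spec_extract_map2 subst out) := by unfold Spec_extract_map2; infer_instance

-- ===== CLAIM (what is proved, stated in full; the proofs are below) =====
def Claim_equal_extract_map2 : Prop := ∀ (subst : String), Dom_extract_map2 subst → Spec_extract_map2 subst (extract_map2 subst)

-- ===== LEMMAS AND PROOFS =====

-- Value of a bitmask given by a predicate on bit positions: Σ_{j<m, p j} 2^j.
def pvSb (p : Nat → Bool) (m : Nat) : Nat :=
  ((List.range m).map (fun j => if p j then 2 ^ j else 0)).sum

lemma pvSb_succ (p : Nat → Bool) (m : Nat) :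
    pvSb p (m + 1) = (if p 0 then 1 else 0) + 2 * pvSb (fun j => p (j + 1)) m := by
  unfold pvSb
  rw [List.range_succ_eq_map, List.map_cons, List.sum_cons, List.map_map]
  have h : ((fun j => if p j then 2 ^ j else 0) ∘ Nat.succ)
      = (fun j => 2 * (if p (j + 1) then 2 ^ j else 0)) := by
    funext j; simp only [Function.comp, Nat.succ_eq_add_one]; split <;> simp [pow_succ]; ring
  rw [h, List.sum_map_mul_left]
  simp

lemma pvSb_testBit (m : Nat) (p : Nat → Bool) (i : Nat) :
    (pvSb p m).testBit i = (decide (i < m) && p i) := by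
  induction m generalizing p i with
  | zero => simp [pvSb]
  | succ m ih =>
    rw [pvSb_succ]
    cases i with
    | zero =>
      rw [Nat.testBit_zero]
      cases h : p 0 with
      | false => simp
      | true => simp
    | succ i =>
      rw [Nat.testBit_add_one]
      have h2 : ((if p 0 then 1 else 0) + 2 * pvSb (fun j => p (j + 1)) m) / 2
          = pvSb (fun j => p (j + 1)) m := by split <;> omega
      rw [h2, ih]
      simp

lemma pvSb_or (p q : Nat → Bool) (m : Nat) :
    pvSb p m ||| pvSb q m = pvSb (fun j => p j || q j) m := by
  apply Nat.eq_of_testBit_eq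
  intro i
  rw [Nat.testBit_or, pvSb_testBit, pvSb_testBit, pvSb_testBit]
  cases p i <;> cases q i <;> simp

lemma pvSb_congr (p q : Nat → Bool) (m : Nat) (h : ∀ j < m, p j = q j) : pvSb p m = pvSb q m := by
  unfold pvSb
  congr 1
  apply List.map_congr_left
  intro j hj
  rw [h j (List.mem_range.mp hj)]

lemma pvSb_and_one (p : Nat → Bool) (m : Nat) :
    pvSb p (m + 1) &&& 1 = (if p 0 then 1 else 0) := by
  rw [Nat.and_one_is_mod, pvSb_succ]; split <;> omega

lemma pvSb_shift (p : Nat → Bool) (m : Nat) :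
    pvSb p (m + 1) >>> 1 = pvSb (fun j => p (j + 1)) m := by
  rw [Nat.shiftRight_one, pvSb_succ]; split <;> omega

-- The bitmask A computes for a first occurrence at t.
def pvMask (cs : List Char) (t : Nat) : Nat :=
  pvSb (fun j => cs.getD t ' ' == cs.getD (t + 1 + j) ' ') (cs.length - (t + 1))

-- A's inner loop computes exactly that mask (shifted by the starting index).
lemma pvInner (cs : List Char) (c : Char) :
    ∀ (k a acc idx : Nat),
      (List.range' a k).foldl
        (fun (u : Nat × Nat) (e : Nat) =>
          ((if c == cs.getD e ' ' then u.1 + (1 <<< u.2) else u.1), u.2 + 1)) (acc, idx)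
      = (acc + 2 ^ idx * pvSb (fun j => c == cs.getD (a + j) ' ') k, idx + k) := by
  intro k
  induction k with
  | zero => intro a acc idx; simp [pvSb]
  | succ k ih =>
    intro a acc idx
    rw [List.range'_succ, List.foldl_cons, ih, pvSb_succ]
    have hp : (fun j => c == cs.getD (a + (j + 1)) ' ') = (fun j => c == cs.getD (a + 1 + j) ' ') := by
      funext j; rw [show a + (j + 1) = a + 1 + j from by omega]
    rw [show a + 0 = a from rfl]
    simp only [hp]
    cases h : (c == cs.getD a ' ') <;>
      simp [Nat.one_shiftLeft, pow_succ, Prod.ext_iff] <;>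
      constructor <;> first | trivial | ring

-- B's filtered sum computes the same mask.
lemma pvMaskB (cs : List Char) (c : Char) (s : Nat) :
    ∀ (k a : Nat), s + 1 ≤ a →
      (((List.range' a k).filter (fun e => cs.getD e ' ' == c)).map
          (fun e => ((1 <<< (e - s - 1) : Nat) : Int))).sum
      = ((2 ^ (a - s - 1) * pvSb (fun j => cs.getD (a + j) ' ' == c) k : Nat) : Int) := by
  intro k
  induction k with
  | zero => intro a _; simp [pvSb]
  | succ k ih =>
    intro a ha
    rw [List.range'_succ, pvSb_succ]
    have hp : (fun j => cs.getD (a + (j + 1)) ' ' == c) = (fun j => cs.getD (a + 1 + j) ' ' == c) := by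
      funext j; rw [show a + (j + 1) = a + 1 + j from by omega]
    rw [show a + 0 = a from rfl]
    have hpow : a + 1 - s - 1 = (a - s - 1) + 1 := by omega
    cases h : (cs.getD a ' ' == c) with
    | true =>
      rw [List.filter_cons_of_pos (by simpa using h), List.map_cons, List.sum_cons,
        ih (a + 1) (by omega)]
      simp only [hp, hpow]
      push_cast [Nat.one_shiftLeft, pow_succ]
      ring
    | false =>
      rw [List.filter_cons_of_neg (by simpa using h), ih (a + 1) (by omega)]
      simp only [hp, hpow]
      push_cast [pow_succ]
      ring

-- Loop invariant for A: at step s, follow_map holds, at bit j, whether position s+j is a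
-- later occurrence of a character already seen strictly before s.
lemma pvLoop (cs : List Char) :
    ∀ (k s : Nat) (pairs : List (List Int)) (fm : Nat),
      s + k < cs.length →
      fm = pvSb (fun j => (cs.take s).contains (cs.getD (s + j) ' ')) (cs.length - s) →
      (List.range' s k).foldl (extract_map2_step cs cs.length) (pairs, fm)
      = (pairs ++ ((List.range' s k).filter
            (fun t => !((cs.take t).contains (cs.getD t ' ')))).map
            (fun (t : Nat) => [(t : Int), (pvMask cs t : Int)]),
         pvSb (fun j => (cs.take (s + k)).contains (cs.getD (s + k + j) ' '))
           (cs.length - (s + k))) := by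
  intro k
  induction k with
  | zero => intro s pairs fm h hfm; simp [hfm]
  | succ k ih =>
    intro s pairs fm h hfm
    have hs : s < cs.length := by omega
    have hlen : cs.length - s = (cs.length - (s + 1)) + 1 := by omega
    have htake : cs.take (s + 1) = cs.take s ++ [cs.getD s ' '] := by
      rw [List.take_add_one]; simp [List.getElem?_eq_getElem hs]
    rw [List.range'_succ, List.foldl_cons]
    have hcond : fm &&& 1 = (if (cs.take s).contains (cs.getD s ' ') then 1 else 0) := by
      rw [hfm, hlen, pvSb_and_one]
      rw [show s + 0 = s from rfl]
    cases hmem : (cs.take s).contains (cs.getD s ' ') with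
    | false =>
      -- s is a first occurrence: A emits a pair and ORs the mask into follow_map
      have hstep : extract_map2_step cs cs.length (pairs, fm) s
          = (pairs ++ [[(s : Int), (pvMask cs s : Int)]],
             (fm >>> 1) ||| pvMask cs s) := by
        unfold extract_map2_step
        rw [hcond, hmem]
        simp only [PySem.List.pyGetD_natCast]
        rw [pvInner cs (cs.getD s ' ') (cs.length - (s + 1)) (s + 1) 0 0]
        simp [pvMask]
      rw [hstep]
      have hfm' : (fm >>> 1) ||| pvMask cs s
          = pvSb (fun j => (cs.take (s + 1)).contains (cs.getD (s + 1 + j) ' '))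
              (cs.length - (s + 1)) := by
        rw [hfm, hlen, pvSb_shift, pvMask, pvSb_or]
        apply pvSb_congr
        intro j hj
        rw [show s + (j + 1) = s + 1 + j from by omega, htake, List.contains_append]
        simp [beq_eq_decide, Bool.or_comm, eq_comm]
      rw [ih (s + 1) _ _ (by omega) hfm']
      rw [List.filter_cons_of_pos (by simpa using hmem), List.map_cons]
      rw [show s + (k + 1) = s + 1 + k from by omega]
      simp
    | true =>
      -- s is a repeat: A only shifts follow_map
      have hstep : extract_map2_step cs cs.length (pairs, fm) s = (pairs, fm >>> 1) := by
        unfold extract_map2_step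
        rw [hcond, hmem]
        simp
      rw [hstep]
      have hfm' : fm >>> 1
          = pvSb (fun j => (cs.take (s + 1)).contains (cs.getD (s + 1 + j) ' '))
              (cs.length - (s + 1)) := by
        rw [hfm, hlen, pvSb_shift]
        apply pvSb_congr
        intro j hj
        rw [show s + (j + 1) = s + 1 + j from by omega, htake, List.contains_append]
        cases hx : (cs.getD (s + 1 + j) ' ' == cs.getD s ' ') with
        | true =>
          have hxe : cs.getD (s + 1 + j) ' ' = cs.getD s ' ' := eq_of_beq hx
          rw [hxe, hmem]
          simp
        | false =>
          have hne : ¬ (cs[s + 1 + j]?.getD ' ' = cs[s]?.getD ' ') := by simpa using hx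
          simp [hne]
      rw [ih (s + 1) _ _ (by omega) hfm']
      rw [List.filter_cons_of_neg (by simpa using hmem)]
      rw [show s + (k + 1) = s + 1 + k from by omega]

-- ===== VERDICT (by name: the statement is the Claim_ definition above) =====
theorem extract_map2_spec : Claim_equal_extract_map2 := by
  intro subst _
  unfold Spec_extract_map2 extract_map2 extract_map2_alt
  simp only [PySem.List.pyGetD_natCast, PySem.List.slice_to_natCast]
  by_cases hn : subst.toList.length = 0
  · simp [hn]
  · rw [List.range_eq_range']
    rw [pvLoop subst.toList (subst.toList.length - 1) 0 [] 0 (by omega) (by simp [pvSb])]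
    simp only [List.nil_append]
    apply List.map_congr_left
    intro t ht
    have ht1 : t + 1 ≤ subst.toList.length := by
      have := List.mem_range'_1.mp (List.mem_filter.mp ht).1
      omega
    rw [pvMaskB subst.toList (subst.toList.getD t ' ') t (subst.toList.length - (t + 1)) (t + 1) (by omega)]
    rw [show t + 1 - t - 1 = 0 from by omega, pow_zero, one_mul]
    have : pvSb (fun j => subst.toList.getD (t + 1 + j) ' ' == subst.toList.getD t ' ')
        (subst.toList.length - (t + 1)) = pvMask subst.toList t := by
      unfold pvMask
      apply pvSb_congr
      intro j hj
      rw [Bool.beq_comm]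
    rw [this]
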